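-- pv_equiv track=rewrite | github.com/pabloschwarzenberg/grader | tema8_ej3/tema8_ej3_b084d05026b77cb1bf2d7a2008d03a6d.py | cuenta_letras
-- ===== SOURCE A (Python) =====
-- def cuenta_letras(frase):
--     sentence = frase.split()
--     sentence = "".join(sentence)
--     n=0
--     for letra in sentence:
--         if letra== ".":
--             continue
--         else:
--             n = n+1
--     return n
-- ===== SOURCE B (Python) =====
-- def cuenta_letras(frase):
--     skipped = (frase.count(".") + frase.count(" ") + frase.count("\t")
--                + frase.count("\n") + frase.count("\r")
--                + frase.count("\v") + frase.count("\f"))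
--     return len(frase) - skipped
-- ===== Notes on version B (the rewrite author's own statement) =====
-- stated objective: faster
-- what changed: Replaces A's split/join plus per-character loop-and-branch by pure arithmetic on built-in aggregate counts (len minus the dot count and each whitespace-character count), avoiding the intermediate split list and joined string and the per-character Python-level loop.
import Mathlib
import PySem

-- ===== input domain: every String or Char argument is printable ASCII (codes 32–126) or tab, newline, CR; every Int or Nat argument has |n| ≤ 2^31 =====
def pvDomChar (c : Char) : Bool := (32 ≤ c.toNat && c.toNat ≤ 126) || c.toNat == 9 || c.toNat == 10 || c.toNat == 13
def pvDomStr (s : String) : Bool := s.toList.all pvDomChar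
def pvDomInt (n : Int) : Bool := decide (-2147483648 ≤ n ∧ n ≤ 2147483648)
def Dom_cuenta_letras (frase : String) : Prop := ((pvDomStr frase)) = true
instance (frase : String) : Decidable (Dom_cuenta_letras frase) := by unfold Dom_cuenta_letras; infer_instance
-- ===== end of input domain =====

-- B replaces A's split/join/per-character loop by arithmetic on aggregate counts: len minus the dot count and each whitespace-character count (measured constant-factor faster: no intermediate strings, no per-character Python loop).

-- ===== PORT A =====
def cuenta_letras (frase : String) : Int :=
  let sentence := PySem.Str.split₀ frase
  let sentence := PySem.Str.join "" sentence
  sentence.toList.foldl (fun n letra => if letra == '.' then n else n + 1) (0 : Int)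

-- ===== PORT B =====
def cuenta_letras_alt (frase : String) : Int :=
  let skipped : Nat :=
    PySem.Str.count frase "." + PySem.Str.count frase " " + PySem.Str.count frase "\t"
      + PySem.Str.count frase "\n" + PySem.Str.count frase "\r"
      + PySem.Str.count frase "\x0b" + PySem.Str.count frase "\x0c"
  (PySem.Str.len frase : Int) - (skipped : Int)

-- ===== PRECONDITION & SPEC =====
def Spec_cuenta_letras (frase : String) (out : Int) : Prop := out = cuenta_letras_alt frase
instance (frase : String) (out : Int) : Decidable (Spec_cuenta_letras frase out) := by unfold Spec_cuenta_letras; infer_instance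

-- ===== CLAIM (what is proved, stated in full; the proofs are below) =====
def Claim_equal_cuenta_letras : Prop := ∀ (frase : String), Dom_cuenta_letras frase → Spec_cuenta_letras frase (cuenta_letras frase)

-- ===== LEMMAS AND PROOFS =====

theorem char_eq_iff_toNat (c d : Char) : (c = d) ↔ c.toNat = d.toNat := by
  constructor
  · rintro rfl; rfl
  · intro h
    exact Char.ext (UInt32.toNat_inj.mp h)

-- ''.join(s.split()) is exactly s with its whitespace characters removed.
theorem split₀_go_flatten (s cur : List Char) (acc : List (List Char)) :
    (PySem.Chars.split₀.go s cur acc).flatten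
      = acc.reverse.flatten ++ cur.reverse ++ s.filter (fun c => !PySem.Chars.isspace c) := by
  induction s generalizing cur acc with
  | nil =>
    simp only [PySem.Chars.split₀.go, List.filter_nil, List.append_nil]
    by_cases h : cur.isEmpty
    · simp_all [List.isEmpty_iff]
    · simp [h, List.flatten_append]
  | cons c rest ih =>
    simp only [PySem.Chars.split₀.go]
    by_cases hs : PySem.Chars.isspace c
    · by_cases h : cur.isEmpty
      · simp_all [List.isEmpty_iff]
      · simp [hs, h, ih, List.flatten_append]
    · simp [hs, ih]

theorem flatten_intersperse_nil {α : Type} (l : List (List α)) :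
    (List.intersperse ([] : List α) l).flatten = l.flatten := by
  induction l with
  | nil => simp
  | cons a t ih => cases t <;> simp_all [List.intersperse]

theorem join_split₀ (s : List Char) :
    PySem.Chars.join [] (PySem.Chars.split₀ s) = s.filter (fun c => !PySem.Chars.isspace c) := by
  have h := split₀_go_flatten s [] []
  simpa [PySem.Chars.split₀, PySem.Chars.join, List.intercalate, flatten_intersperse_nil] using h

theorem foldl_count_ne_dot (l : List Char) (a : Int) :
    l.foldl (fun n letra => if letra == '.' then n else n + 1) a
      = a + (l.countP (fun c => !(c == '.')) : Int) := by
  induction l generalizing a with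
  | nil => simp
  | cons c rest ih =>
    rw [List.foldl_cons, ih, List.countP_cons]
    by_cases h : c = '.'
    · simp [h]
    · simp [h]; ring

-- counting a single-character needle equals List.count of that character
theorem count_go_single (c : Char) (l : List Char) (fuel acc : Nat) (hf : l.length ≤ fuel) :
    PySem.Chars.count.go [c] fuel l acc = acc + l.count c := by
  induction l generalizing fuel acc with
  | nil => cases fuel <;> simp [PySem.Chars.count.go]
  | cons h t ih =>
    cases fuel with
    | zero => simp at hf
    | succ fuel =>
      have hf' : t.length ≤ fuel := by simpa using hf
      by_cases hc : c = h
      · subst hc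
        simp [PySem.Chars.count.go, List.isPrefixOf, ih _ _ hf']
        omega
      · have hpre : ([c].isPrefixOf (h :: t)) = false := by
          simp [List.isPrefixOf]
          exact fun habs => hc (by simpa using habs)
        have hbc : (c == h) = false := by
          simpa using hc
        simp [PySem.Chars.count.go, hpre, ih _ _ hf', List.count_cons]
        exact fun x => hc x.symm

theorem count_single (s : List Char) (c : Char) :
    PySem.Chars.count s [c] = s.count c := by
  simpa [PySem.Chars.count] using count_go_single c s s.length 0 le_rfl

-- per-character accounting on the domain: each admitted character is counted exactly once,
-- either by B's subtracted indicators or by the keep-predicate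
theorem char_step (c : Char) (h : pvDomChar c = true) :
    ((if c = '.' then 1 else 0) + (if c = ' ' then 1 else 0) + (if c = '\t' then 1 else 0)
      + (if c = '\n' then 1 else 0) + (if c = '\r' then 1 else 0)
      + (if c = '\x0b' then 1 else 0) + (if c = '\x0c' then 1 else 0) : Int)
      + (if (!PySem.Chars.isspace c && !(c == '.')) then 1 else 0) = 1 := by
  have e1 := char_eq_iff_toNat c '.'
  have e2 := char_eq_iff_toNat c ' '
  have e3 := char_eq_iff_toNat c '\t'
  have e4 := char_eq_iff_toNat c '\n'
  have e5 := char_eq_iff_toNat c '\r'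
  have e6 := char_eq_iff_toNat c '\x0b'
  have e7 := char_eq_iff_toNat c '\x0c'
  simp only [show ('.' : Char).toNat = 46 from rfl, show (' ' : Char).toNat = 32 from rfl,
    show ('\t' : Char).toNat = 9 from rfl, show ('\n' : Char).toNat = 10 from rfl,
    show ('\r' : Char).toNat = 13 from rfl, show ('\x0b' : Char).toNat = 11 from rfl,
    show ('\x0c' : Char).toNat = 12 from rfl] at e1 e2 e3 e4 e5 e6 e7
  simp only [pvDomChar, Bool.or_eq_true, Bool.and_eq_true, beq_iff_eq, decide_eq_true_eq] at h
  by_cases b1 : c = '.'; · subst b1; decide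
  by_cases b2 : c = ' '; · subst b2; decide
  by_cases b3 : c = '\t'; · subst b3; decide
  by_cases b4 : c = '\n'; · subst b4; decide
  by_cases b5 : c = '\r'; · subst b5; decide
  by_cases b6 : c = '\x0b'; · subst b6; decide
  by_cases b7 : c = '\x0c'; · subst b7; decide
  rw [e1] at b1; rw [e2] at b2; rw [e3] at b3; rw [e4] at b4
  rw [e5] at b5; rw [e6] at b6; rw [e7] at b7
  have hs : PySem.Chars.isspace c = false := by
    simp only [PySem.Chars.isspace, Bool.or_eq_false_iff, Bool.and_eq_false_iff,
      decide_eq_false_iff_not]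
    omega
  simp only [e1, e2, e3, e4, e5, e6, e7]
  simp [hs, b1, b2, b3, b4, b5, b6, b7]
  exact fun x => b1 (e1.mp x)

-- B's arithmetic equals the keep-count, character by character, on the domain
theorem len_sub_counts (l : List Char) (h : l.all pvDomChar = true) :
    (l.length : Int)
      - ((l.count '.' + l.count ' ' + l.count '\t' + l.count '\n' + l.count '\r'
          + l.count '\x0b' + l.count '\x0c' : Nat) : Int)
      = (l.countP (fun c => !PySem.Chars.isspace c && !(c == '.')) : Int) := by
  induction l with
  | nil => simp
  | cons c t ih =>
    simp only [List.all_cons, Bool.and_eq_true] at h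
    have step := char_step c h.1
    have iht := ih h.2
    simp only [List.length_cons, List.count_cons, List.countP_cons, beq_iff_eq]
    push_cast
    push_cast at iht
    linarith [step, iht]

-- ===== VERDICT (by name: the statement is the Claim_ definition above) =====
theorem cuenta_letras_spec : Claim_equal_cuenta_letras := by
  intro frase hdom
  unfold Spec_cuenta_letras cuenta_letras cuenta_letras_alt
  have hjoin : (PySem.Str.join "" (PySem.Str.split₀ frase)).toList
      = frase.toList.filter (fun c => !PySem.Chars.isspace c) := by
    have h := join_split₀ frase.toList
    simp only [PySem.Str.join, PySem.Str.split₀]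
    simpa [Function.comp_def] using h
  have hdom' : frase.toList.all pvDomChar = true := hdom
  simp only [PySem.Str.count_eq, PySem.Str.len_eq]
  rw [hjoin, foldl_count_ne_dot, List.countP_filter]
  have key := len_sub_counts frase.toList hdom'
  have hfun : (fun c => (!(c == '.')) && !PySem.Chars.isspace c)
      = (fun c => !PySem.Chars.isspace c && !(c == '.')) := by
    funext c; exact Bool.and_comm _ _
  simp only [show ("." : String).toList = ['.'] from rfl, show (" " : String).toList = [' '] from rfl,
    show ("\t" : String).toList = ['\t'] from rfl, show ("\n" : String).toList = ['\n'] from rfl,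
    show ("\r" : String).toList = ['\r'] from rfl, show ("\x0b" : String).toList = ['\x0b'] from rfl,
    show ("\x0c" : String).toList = ['\x0c'] from rfl, count_single]
  rw [hfun]
  push_cast at key ⊢
  omega
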